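-- pv_equiv track=rewrite | github.com/lilakk/BooookScore | booookscore/chunk.py | find_punctuations
-- ===== SOURCE A (Python) =====
-- def find_punctuations(text, comma=False):
--     if comma:
--         puncs = ['.', '?', '!', ',', '."', '?"', '!"', ".'", "?'", "!'"]
--     else:
--         puncs = ['.', '?', '!', '."', '?"', '!"', ".'", "?'", "!'"]
--
--     puncs_idx = []
--     for i, c in enumerate(text):
--         if c in puncs:
--             puncs_idx.append(i)
--         elif c == '"' or c == "'":
--             if i > 0 and text[i-1] in ['.', '?', '!']:
--                 puncs_idx.append(i)
--
--     return puncs_idx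
-- ===== SOURCE B (Python) =====
-- def find_punctuations(text, comma=False):
--     ends = '.?!,' if comma else '.?!'
--     hits = [i for i, c in enumerate(text) if c in ends]
--     quotes = [i + 1 for i, (p, q) in enumerate(zip(text, text[1:])) if p in '.?!' and q in '\'"']
--     return sorted(hits + quotes)
-- ===== Notes on version B (the rewrite author's own statement) =====
-- stated objective: alternative
-- what changed: Replaces A's single stateful loop with a back-reference text[i-1] by two independent comprehensions - sentence-end indices, and quote indices read off adjacent pairs zip(text, text[1:]) - merged with sorted().
import Mathlib
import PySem

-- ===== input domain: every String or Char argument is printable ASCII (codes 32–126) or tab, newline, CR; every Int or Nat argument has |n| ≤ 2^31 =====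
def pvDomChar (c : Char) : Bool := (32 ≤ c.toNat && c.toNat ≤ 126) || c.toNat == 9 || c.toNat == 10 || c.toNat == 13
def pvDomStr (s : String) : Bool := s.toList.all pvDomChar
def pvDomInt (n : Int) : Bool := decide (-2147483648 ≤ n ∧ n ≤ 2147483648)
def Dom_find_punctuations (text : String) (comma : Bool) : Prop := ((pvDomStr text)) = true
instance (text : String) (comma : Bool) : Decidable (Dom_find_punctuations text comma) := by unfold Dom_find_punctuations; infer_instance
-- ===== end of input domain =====

-- B replaces A's single indexed loop (with a back-reference text[i-1]) by two independent
-- comprehensions — sentence-end hits, and quotes read off adjacent pairs zip(text, text[1:]) —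
-- merged with sorted(); alternative decomposition, same asymptotic cost.

-- ===== PORT A =====
def find_punctuations (text : String) (comma : Bool) : List Int :=
  let puncs : List String :=
    if comma then [".", "?", "!", ",", ".\"", "?\"", "!\"", ".'", "?'", "!'"]
    else [".", "?", "!", ".\"", "?\"", "!\"", ".'", "?'", "!'"]
  (PySem.List.enumerate text.toList 0).foldl
    (fun puncs_idx ic =>
      if String.ofList [ic.2] ∈ puncs then puncs_idx ++ [ic.1]
      else if ic.2 = '"' ∨ ic.2 = '\'' then
        if ic.1 > 0 ∧ PySem.Str.pyGet? text (ic.1 - 1) ∈ ([some '.', some '?', some '!'] : List (Option Char)) then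
          puncs_idx ++ [ic.1]
        else puncs_idx
      else puncs_idx) []

-- ===== PORT B =====
def find_punctuations_alt (text : String) (comma : Bool) : List Int :=
  let ends : List Char := if comma then ['.', '?', '!', ','] else ['.', '?', '!']
  let hits : List Int :=
    (PySem.List.enumerate text.toList 0).filterMap
      (fun ic => if ic.2 ∈ ends then some ic.1 else none)
  let quotes : List Int :=
    (PySem.List.enumerate (text.toList.zip (PySem.Chars.slice text.toList (some 1) none)) 0).filterMap
      (fun ip => if ip.2.1 ∈ (['.', '?', '!'] : List Char) ∧ (ip.2.2 = '\'' ∨ ip.2.2 = '"') then some (ip.1 + 1) else none)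
  PySem.List.sorted (hits ++ quotes) (fun x => x) false

-- ===== PRECONDITION & SPEC =====
def Spec_find_punctuations (text : String) (comma : Bool) (out : List Int) : Prop := out = find_punctuations_alt text comma
instance (text : String) (comma : Bool) (out : List Int) : Decidable (Spec_find_punctuations text comma out) := by unfold Spec_find_punctuations; infer_instance

-- ===== CLAIM (what is proved, stated in full; the proofs are below) =====
def Claim_equal_find_punctuations : Prop := ∀ (text : String) (comma : Bool), Dom_find_punctuations text comma → Spec_find_punctuations text comma (find_punctuations text comma)

-- ===== LEMMAS AND PROOFS =====

/-- The sentence-end characters as chars, as a function of `comma`. -/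
def pvEnds (comma : Bool) : List Char := if comma then ['.', '?', '!', ','] else ['.', '?', '!']

/-- One-pass reference function: previous char (if any), current index, remaining chars. -/
def pvF (ends : List Char) : Option Char → Int → List Char → List Int
  | _, _, [] => []
  | p, i, c :: cs =>
    if c ∈ ends then i :: pvF ends (some c) (i + 1) cs
    else if p ∈ ([some '.', some '?', some '!'] : List (Option Char)) ∧ (c = '"' ∨ c = '\'') then
      i :: pvF ends (some c) (i + 1) cs
    else pvF ends (some c) (i + 1) cs

/-- Indices of sentence-end characters only. -/
def pvH (ends : List Char) : Int → List Char → List Int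
  | _, [] => []
  | i, c :: cs => if c ∈ ends then i :: pvH ends (i + 1) cs else pvH ends (i + 1) cs

/-- Indices of quotes that follow `.?!`. -/
def pvG : Option Char → Int → List Char → List Int
  | _, _, [] => []
  | p, i, c :: cs =>
    if p ∈ ([some '.', some '?', some '!'] : List (Option Char)) ∧ (c = '"' ∨ c = '\'') then
      i :: pvG (some c) (i + 1) cs
    else pvG (some c) (i + 1) cs

theorem pv_ofList_singleton_eq_iff (c : Char) (s : String) :
    String.ofList [c] = s ↔ [c] = s.toList := by
  constructor
  · intro h; rw [← h]; simp
  · intro h; rw [h]; exact String.ofList_toList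

theorem pv_mem_puncs_iff (comma : Bool) (c : Char) :
    (String.ofList [c] ∈ (if comma then ([".", "?", "!", ",", ".\"", "?\"", "!\"", ".'", "?'", "!'"] : List String)
                          else [".", "?", "!", ".\"", "?\"", "!\"", ".'", "?'", "!'"])) ↔ c ∈ pvEnds comma := by
  cases comma <;> simp [pvEnds, pv_ofList_singleton_eq_iff]

theorem pv_ends_not_quote (comma : Bool) (c : Char) (hc : c ∈ pvEnds comma) :
    ¬ (c = '"' ∨ c = '\'') := by
  cases comma <;> simp [pvEnds] at hc <;> rcases hc with rfl | rfl | rfl | rfl <;> simp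

theorem pv_prev_iff (text : String) (pre rest : List Char) (h : text.toList = pre ++ rest) :
    (((pre.length : Int) > 0 ∧ PySem.Str.pyGet? text ((pre.length : Int) - 1) ∈ ([some '.', some '?', some '!'] : List (Option Char)))
      ↔ pre.getLast? ∈ ([some '.', some '?', some '!'] : List (Option Char))) := by
  cases pre with
  | nil => simp
  | cons p ps =>
      have e1 : (((p :: ps).length : Int) - 1) = ((ps.length : Nat) : Int) := by
        push_cast [List.length_cons]; ring
      have hget : PySem.Str.pyGet? text (((p :: ps).length : Int) - 1) = (p :: ps).getLast? := by
        rw [e1, PySem.Str.pyGet?_natCast, h]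
        rw [List.getElem?_append_left (by simp)]
        rw [List.getLast?_eq_getElem?]
        simp
      rw [hget]
      simp

theorem pv_foldA_eq (comma : Bool) (text : String) :
    ∀ (suf pre : List Char) (acc : List Int), text.toList = pre ++ suf →
    (PySem.List.enumerate suf (pre.length : Int)).foldl
      (fun puncs_idx ic =>
        if String.ofList [ic.2] ∈ (if comma then ([".", "?", "!", ",", ".\"", "?\"", "!\"", ".'", "?'", "!'"] : List String)
                                   else [".", "?", "!", ".\"", "?\"", "!\"", ".'", "?'", "!'"]) then puncs_idx ++ [ic.1]
        else if ic.2 = '"' ∨ ic.2 = '\'' then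
          if ic.1 > 0 ∧ PySem.Str.pyGet? text (ic.1 - 1) ∈ ([some '.', some '?', some '!'] : List (Option Char)) then
            puncs_idx ++ [ic.1]
          else puncs_idx
        else puncs_idx) acc
      = acc ++ pvF (pvEnds comma) pre.getLast? (pre.length : Int) suf := by
  intro suf
  induction suf with
  | nil => intro pre acc _; simp [PySem.List.enumerate_nil, pvF]
  | cons c cs ih =>
      intro pre acc h
      rw [PySem.List.enumerate_cons, List.foldl_cons]
      have h' : text.toList = (pre ++ [c]) ++ cs := by simpa using h
      have hrec := ih (pre ++ [c]) (acc ++ [(pre.length : Int)]) h'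
      have hrec2 := ih (pre ++ [c]) acc h'
      have hlen : (((pre ++ [c]).length : Nat) : Int) = (pre.length : Int) + 1 := by
        simp
      rw [hlen, List.getLast?_concat] at hrec hrec2
      by_cases hc : c ∈ pvEnds comma
      · rw [if_pos ((pv_mem_puncs_iff comma c).2 hc)]
        rw [hrec]
        simp [pvF, hc]
      · rw [if_neg (fun hm => hc ((pv_mem_puncs_iff comma c).1 hm))]
        by_cases hq : c = '"' ∨ c = '\''
        · rw [if_pos hq]
          by_cases hin : pre.getLast? ∈ ([some '.', some '?', some '!'] : List (Option Char))
          · rw [if_pos ((pv_prev_iff text pre (c :: cs) h).2 hin)]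
            rw [hrec]
            simp [pvF, hc, hq, hin]
          · rw [if_neg (fun hcon => hin ((pv_prev_iff text pre (c :: cs) h).1 hcon))]
            rw [hrec2]
            simp [pvF, hc, hq, hin]
        · rw [if_neg hq]
          rw [hrec2]
          simp [pvF, hc, hq]

theorem pv_hits_eq (ends : List Char) :
    ∀ (l : List Char) (i : Int),
    (PySem.List.enumerate l i).filterMap (fun ic => if ic.2 ∈ ends then some ic.1 else none)
      = pvH ends i l := by
  intro l
  induction l with
  | nil => intro i; simp [PySem.List.enumerate_nil, pvH]
  | cons c cs ih =>
      intro i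
      rw [PySem.List.enumerate_cons]
      by_cases hc : c ∈ ends <;> simp [pvH, hc, ih]

theorem pv_quotes_aux :
    ∀ (cs : List Char) (c : Char) (i : Int),
    (PySem.List.enumerate ((c :: cs).zip cs) i).filterMap
        (fun ip => if ip.2.1 ∈ (['.', '?', '!'] : List Char) ∧ (ip.2.2 = '\'' ∨ ip.2.2 = '"') then some (ip.1 + 1) else none)
      = pvG (some c) (i + 1) cs := by
  intro cs
  induction cs with
  | nil => intro c i; simp [PySem.List.enumerate_nil, pvG]
  | cons d cs' ih =>
      intro c i
      rw [List.zip_cons_cons, PySem.List.enumerate_cons, List.filterMap_cons]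
      by_cases h : (c = '.' ∨ c = '?' ∨ c = '!') ∧ (d = '\'' ∨ d = '"')
      · have hh := ih d (i + 1)
        rw [show i + 1 + 1 = i + 2 from by ring] at hh
        have h3 : (c = '.' ∨ c = '?' ∨ c = '!') ∧ (d = '"' ∨ d = '\'') := by tauto
        simp [pvG, h, h3, show i + 1 + 1 = i + 2 from by ring]
        simpa using hh
      · have hh := ih d (i + 1)
        rw [show i + 1 + 1 = i + 2 from by ring] at hh
        have h3 : ¬ ((c = '.' ∨ c = '?' ∨ c = '!') ∧ (d = '"' ∨ d = '\'')) := by tauto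
        simp [pvG, h, h3, show i + 1 + 1 = i + 2 from by ring]
        simpa using hh

theorem pv_quotes_eq (l : List Char) :
    (PySem.List.enumerate (l.zip (PySem.Chars.slice l (some 1) none)) 0).filterMap
        (fun ip => if ip.2.1 ∈ (['.', '?', '!'] : List Char) ∧ (ip.2.2 = '\'' ∨ ip.2.2 = '"') then some (ip.1 + 1) else none)
      = pvG none 0 l := by
  have hsl : PySem.Chars.slice l (some 1) none = l.tail := by
    simp [PySem.Chars.slice, PySem.List.slice_from_one]
  rw [hsl]
  cases l with
  | nil => simp [PySem.List.enumerate_nil, pvG]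
  | cons c cs =>
      have := pv_quotes_aux cs c 0
      simp only [List.tail_cons]
      rw [this]
      simp [pvG]

theorem pv_perm_HG (comma : Bool) :
    ∀ (l : List Char) (p : Option Char) (i : Int),
    (pvH (pvEnds comma) i l ++ pvG p i l).Perm (pvF (pvEnds comma) p i l) := by
  intro l
  induction l with
  | nil => intro p i; simp [pvH, pvG, pvF]
  | cons c cs ih =>
      intro p i
      by_cases hc : c ∈ pvEnds comma
      · have hq : ¬ (p ∈ ([some '.', some '?', some '!'] : List (Option Char)) ∧ (c = '"' ∨ c = '\'')) := by
          intro h; exact pv_ends_not_quote comma c hc h.2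
        simp only [pvH, pvG, pvF, if_pos hc, if_neg hq]
        exact (ih (some c) (i + 1)).cons i
      · by_cases hq : p ∈ ([some '.', some '?', some '!'] : List (Option Char)) ∧ (c = '"' ∨ c = '\'')
        · simp only [pvH, pvG, pvF, if_neg hc, if_pos hq]
          exact List.perm_middle.trans ((ih (some c) (i + 1)).cons i)
        · simp only [pvH, pvG, pvF, if_neg hc, if_neg hq]
          exact ih (some c) (i + 1)

theorem pv_mem_pvF (ends : List Char) :
    ∀ (l : List Char) (p : Option Char) (i x : Int), x ∈ pvF ends p i l → i ≤ x := by
  intro l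
  induction l with
  | nil => intro p i x h; simp [pvF] at h
  | cons c cs ih =>
      intro p i x h
      simp only [pvF] at h
      split at h
      · rcases List.mem_cons.1 h with rfl | h'
        · exact le_refl x
        · have := ih (some c) (i + 1) x h'; omega
      · split at h
        · rcases List.mem_cons.1 h with rfl | h'
          · exact le_refl x
          · have := ih (some c) (i + 1) x h'; omega
        · have := ih (some c) (i + 1) x h; omega

theorem pv_pairwise_pvF (ends : List Char) :
    ∀ (l : List Char) (p : Option Char) (i : Int), (pvF ends p i l).Pairwise (· < ·) := by
  intro l
  induction l with
  | nil => intro p i; simp [pvF]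
  | cons c cs ih =>
      intro p i
      have hcons : (i :: pvF ends (some c) (i + 1) cs).Pairwise (· < ·) := by
        refine List.Pairwise.cons ?_ (ih (some c) (i + 1))
        intro x hx
        have := pv_mem_pvF ends cs (some c) (i + 1) x hx
        omega
      simp only [pvF]
      split
      · exact hcons
      · split
        · exact hcons
        · exact ih (some c) (i + 1)

-- ===== VERDICT (by name: the statement is the Claim_ definition above) =====
theorem find_punctuations_spec : Claim_equal_find_punctuations := by
  intro text comma _hd
  show find_punctuations text comma = find_punctuations_alt text comma
  have hA : find_punctuations text comma = pvF (pvEnds comma) none 0 text.toList := by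
    simpa [find_punctuations] using pv_foldA_eq comma text text.toList [] [] (by simp)
  have hB : find_punctuations_alt text comma
      = PySem.List.sorted (pvH (pvEnds comma) 0 text.toList ++ pvG none 0 text.toList) (fun x => x) false := by
    simp only [find_punctuations_alt]
    rw [pv_hits_eq, pv_quotes_eq]
    cases comma <;> rfl
  rw [hA, hB]
  exact (PySem.List.sorted_eq_of_perm_of_pairwise_lt _ _ (fun x => x)
    ((pv_perm_HG comma text.toList none 0).symm)
    (pv_pairwise_pvF (pvEnds comma) text.toList none 0)).symm
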